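-- pv_equiv track=rewrite | github.com/debanik1997/Prot-Search | api/scripts/six_frame_translation.py | six_frame_translation
-- ===== SOURCE A (Python) =====
-- def reverse_complement(s):
--     complement_map = {'A': 'T', 'T': 'A', 'C': 'G', 'G': 'C'}
--     output = []
--     for c in s:
--         if c in 'ACGT':
--             output.append(complement_map[c])
--     return ''.join(output[::-1])
--
-- def three_frame_translation(s):
--     frame_0 = [s[i:i+3] for i in range(0, len(s), 3)]
--     frame_1 = [s[1:][i:i+3] for i in range(0, len(s[1:]), 3)]
--     frame_1.insert(0, s[:1])
--     frame_2 = [s[2:][i:i+3] for i in range(0, len(s[2:]), 3)]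
--     frame_2.insert(0, s[:2])
--     return [frame_0, frame_1, frame_2]
--
-- def six_frame_translation(s):
--     output = []
--     codon_map = {'UUU': 'F',
--                  'UUC': 'F',
--                  'UUA': 'L',
--                  'UUG': 'L',
--                  'UCU': 'S',
--                  'UCC': 'S',
--                  'UCA': 'S',
--                  'UCG': 'S',
--                  'UAU': 'Y',
--                  'UAC': 'Y',
--                  'UAA': '*',
--                  'UAG': '*',
--                  'UGU': 'C',
--                  'UGC': 'C',
--                  'UGA': '*',
--                  'UGG': 'W',
--                  'CUU': 'L',
--                  'CUC': 'L',
--                  'CUA': 'L',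
--                  'CUG': 'L',
--                  'CCU': 'P',
--                  'CCC': 'P',
--                  'CCA': 'P',
--                  'CCG': 'P',
--                  'CAU': 'H',
--                  'CAC': 'H',
--                  'CAA': 'Q',
--                  'CAG': 'Q',
--                  'CGU': 'R',
--                  'CGC': 'R',
--                  'CGA': 'R',
--                  'CGG': 'R',
--                  'AUU': 'I',
--                  'AUC': 'I',
--                  'AUA': 'I',
--                  'AUG': 'M',
--                  'ACU': 'T',
--                  'ACC': 'T',
--                  'ACA': 'T',
--                  'ACG': 'T',
--                  'AAU': 'N',
--                  'AAC': 'N',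
--                  'AAA': 'K',
--                  'AAG': 'K',
--                  'AGU': 'S',
--                  'AGC': 'S',
--                  'AGA': 'R',
--                  'AGG': 'R',
--                  'GUU': 'V',
--                  'GUC': 'V',
--                  'GUA': 'V',
--                  'GUG': 'V',
--                  'GCU': 'A',
--                  'GCC': 'A',
--                  'GCA': 'A',
--                  'GCG': 'A',
--                  'GAU': 'D',
--                  'GAC': 'D',
--                  'GAA': 'E',
--                  'GAG': 'E',
--                  'GGU': 'G',
--                  'GGC': 'G',
--                  'GGA': 'G',
--                  'GGG': 'G', }
--     translations = three_frame_translation(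
--         s) + three_frame_translation(reverse_complement(s))
--     for translation in translations:
--         current_amino_acid_seq = []
--         for codon in translation:
--             rna_codon = codon.replace("T", "U")
--             if rna_codon in codon_map:
--                 current_amino_acid_seq.append(codon_map[rna_codon])
--         output.append(''.join(current_amino_acid_seq))
--     return output
-- ===== SOURCE B (Python) =====
-- # Six-frame translation via base-4 numeric codon encoding. One pass turns the
-- # string into digit lists (A=0,C=1,G=2,T/U=3, -1 otherwise) -- building the
-- # reverse-complement digits directly as 3-d on the fly -- and each frame is
-- # read off by arithmetic indexing into a flat 64-character amino-acid table.
--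
-- _AA64 = "KNKNTTTTRSRSIIMIQHQHPPPPRRRRLLLLEDEDAAAAGGGGVVVV*Y*YSSSS*CWCLFLF"
-- _DIG = {'A': 0, 'C': 1, 'G': 2, 'T': 3, 'U': 3}
--
--
-- def _translate(digs, offset):
--     out = []
--     for i in range(offset, len(digs) - 2, 3):
--         a, b, c = digs[i], digs[i + 1], digs[i + 2]
--         if a >= 0 and b >= 0 and c >= 0:
--             out.append(_AA64[16 * a + 4 * b + c])
--     return ''.join(out)
--
--
-- def six_frame_translation(s):
--     digs = []
--     rcd = []
--     for ch in s:
--         d = _DIG.get(ch, -1)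
--         digs.append(d)
--         if d >= 0 and ch != 'U':
--             rcd.append(3 - d)
--     rcd.reverse()
--     return [_translate(digs, 0), _translate(digs, 1), _translate(digs, 2),
--             _translate(rcd, 0), _translate(rcd, 1), _translate(rcd, 2)]
-- ===== Notes on version B (the rewrite author's own statement) =====
-- stated objective: faster
-- what changed: B replaces A's codon-string slicing, T->U replace and dict lookups entirely by a base-4 numeric encoding: one pass maps each character to a digit (A=0,C=1,G=2,T/U=3, -1 otherwise) and simultaneously emits the reverse-complement digits as 3-d (no complement dict, no second scan), and every frame is then translated by arithmetic indexing 16a+4b+c into a flat 64-character amino-acid table instead of hashing codon strings.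
import Mathlib
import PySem

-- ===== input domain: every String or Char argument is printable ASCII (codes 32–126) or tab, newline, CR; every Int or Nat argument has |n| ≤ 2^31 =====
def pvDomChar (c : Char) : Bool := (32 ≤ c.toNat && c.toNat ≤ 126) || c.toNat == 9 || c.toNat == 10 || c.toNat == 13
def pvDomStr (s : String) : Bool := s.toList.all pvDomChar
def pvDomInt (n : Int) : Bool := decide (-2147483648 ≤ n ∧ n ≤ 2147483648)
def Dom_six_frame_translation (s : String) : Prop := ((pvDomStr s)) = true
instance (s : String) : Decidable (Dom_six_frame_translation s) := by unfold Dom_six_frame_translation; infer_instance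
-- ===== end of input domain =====

-- B drops A's codon-string slicing, T→U replace and codon dict: one pass encodes the string as
-- base-4 digits (emitting the reverse-complement digits as 3-d on the fly) and each frame indexes
-- arithmetically into a flat 64-character amino-acid table; objective: faster (constant factor).

-- ===== PORT A =====

-- A: complement_map (dict literal, insertion order as in the Python)
def pvComplA : PySem.Dict Char Char := ⟨[('A','T'),('T','A'),('C','G'),('G','C')]⟩

-- A: reverse_complement — keep A/C/G/T, complement, then reverse; ''.join over chars.
-- complement_map[c] is guarded by `c in 'ACGT'`, so the KeyError branch is unreachable; getD is exact here.
def pvRevCompA (s : List Char) : List Char :=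
  (s.foldl (fun output c =>
    if PySem.Chars.isIn [c] ['A','C','G','T'] then output ++ [pvComplA.getD c 'A'] else output) []).reverse

-- A: three_frame_translation — codon lists for the three frames, with the s[:1]/s[:2] fragments inserted at 0
def pvTFT (s : List Char) : List (List (List Char)) :=
  let frame0 := (PySem.List.pyRange 0 (PySem.List.len s) 3).map
      (fun i => PySem.List.slice s (some i) (some (i+3)))
  let s1 := PySem.List.slice s (some 1) none
  let frame1 := PySem.List.insert ((PySem.List.pyRange 0 (PySem.List.len s1) 3).map
      (fun i => PySem.List.slice s1 (some i) (some (i+3)))) 0 (PySem.List.slice s none (some 1))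
  let s2 := PySem.List.slice s (some 2) none
  let frame2 := PySem.List.insert ((PySem.List.pyRange 0 (PySem.List.len s2) 3).map
      (fun i => PySem.List.slice s2 (some i) (some (i+3)))) 0 (PySem.List.slice s none (some 2))
  [frame0, frame1, frame2]

-- A: codon_map (single-char values as Char; ''.join over them is String.ofList)
def pvCodonMap : PySem.Dict (List Char) Char := ⟨[
   (['U','U','U'],'F'),(['U','U','C'],'F'),(['U','U','A'],'L'),(['U','U','G'],'L'),
   (['U','C','U'],'S'),(['U','C','C'],'S'),(['U','C','A'],'S'),(['U','C','G'],'S'),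
   (['U','A','U'],'Y'),(['U','A','C'],'Y'),(['U','A','A'],'*'),(['U','A','G'],'*'),
   (['U','G','U'],'C'),(['U','G','C'],'C'),(['U','G','A'],'*'),(['U','G','G'],'W'),
   (['C','U','U'],'L'),(['C','U','C'],'L'),(['C','U','A'],'L'),(['C','U','G'],'L'),
   (['C','C','U'],'P'),(['C','C','C'],'P'),(['C','C','A'],'P'),(['C','C','G'],'P'),
   (['C','A','U'],'H'),(['C','A','C'],'H'),(['C','A','A'],'Q'),(['C','A','G'],'Q'),
   (['C','G','U'],'R'),(['C','G','C'],'R'),(['C','G','A'],'R'),(['C','G','G'],'R'),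
   (['A','U','U'],'I'),(['A','U','C'],'I'),(['A','U','A'],'I'),(['A','U','G'],'M'),
   (['A','C','U'],'T'),(['A','C','C'],'T'),(['A','C','A'],'T'),(['A','C','G'],'T'),
   (['A','A','U'],'N'),(['A','A','C'],'N'),(['A','A','A'],'K'),(['A','A','G'],'K'),
   (['A','G','U'],'S'),(['A','G','C'],'S'),(['A','G','A'],'R'),(['A','G','G'],'R'),
   (['G','U','U'],'V'),(['G','U','C'],'V'),(['G','U','A'],'V'),(['G','U','G'],'V'),
   (['G','C','U'],'A'),(['G','C','C'],'A'),(['G','C','A'],'A'),(['G','C','G'],'A'),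
   (['G','A','U'],'D'),(['G','A','C'],'D'),(['G','A','A'],'E'),(['G','A','G'],'E'),
   (['G','G','U'],'G'),(['G','G','C'],'G'),(['G','G','A'],'G'),(['G','G','G'],'G')]⟩

-- A: the inner loop body — rna = codon.replace("T","U"); if rna in codon_map: append codon_map[rna]
-- (codon_map[rna] guarded by the membership test, so getD is exact)
def pvStepA (acc : List Char) (codon : List Char) : List Char :=
  let rna := PySem.Chars.replace codon ['T'] ['U']
  if pvCodonMap.contains rna then acc ++ [pvCodonMap.getD rna 'X'] else acc

def six_frame_translation (s : String) : List String :=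
  (pvTFT s.toList ++ pvTFT (pvRevCompA s.toList)).foldl
    (fun output tr => output ++ [String.ofList (tr.foldl pvStepA [])]) []

-- ===== PORT B =====

-- B: _AA64 — the flat amino-acid table, indexed arithmetically (_AA64[i] is in range whenever
-- the guard 0 ≤ a,b,c holds, so pyGetD with a default is exact)
def pvAA64 : List Char :=
  "KNKNTTTTRSRSIIMIQHQHPPPPRRRRLLLLEDEDAAAAGGGGVVVV*Y*YSSSS*CWCLFLF".toList

-- B: _DIG
def pvDigMap : PySem.Dict Char Int := ⟨[('A',0),('C',1),('G',2),('T',3),('U',3)]⟩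

-- B: _translate(digs, offset) — for i in range(offset, len(digs)-2, 3); digs[i..i+2] are in
-- range for every i the range produces, so pyGetD is exact
def pvTrB (digs : List Int) (offset : Int) : String :=
  String.ofList ((PySem.List.pyRange offset (PySem.List.len digs - 2) 3).foldl
    (fun out i =>
      let a := PySem.List.pyGetD digs i (-1)
      let b := PySem.List.pyGetD digs (i+1) (-1)
      let c := PySem.List.pyGetD digs (i+2) (-1)
      if 0 ≤ a ∧ 0 ≤ b ∧ 0 ≤ c then out ++ [PySem.List.pyGetD pvAA64 (16*a+4*b+c) 'X'] else out)
    [])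

-- B: one loop appends d = _DIG.get(ch,-1) to digs and, for ACGT chars, 3-d to rcd; rcd.reverse()
def six_frame_translation_alt (s : String) : List String :=
  let st := s.toList.foldl (fun (st : List Int × List Int) ch =>
    let d := pvDigMap.getD ch (-1)
    (st.1 ++ [d], if 0 ≤ d ∧ ch ≠ 'U' then st.2 ++ [3 - d] else st.2)) ([], [])
  let digs := st.1
  let rcd := st.2.reverse
  [pvTrB digs 0, pvTrB digs 1, pvTrB digs 2, pvTrB rcd 0, pvTrB rcd 1, pvTrB rcd 2]

-- ===== PRECONDITION & SPEC =====
def Spec_six_frame_translation (s : String) (out : List String) : Prop := out = six_frame_translation_alt s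
instance (s : String) (out : List String) : Decidable (Spec_six_frame_translation s out) := by unfold Spec_six_frame_translation; infer_instance

-- ===== CLAIM (what is proved, stated in full; the proofs are below) =====
def Claim_equal_six_frame_translation : Prop := ∀ (s : String), Dom_six_frame_translation s → Spec_six_frame_translation s (six_frame_translation s)

-- ===== LEMMAS AND PROOFS =====

-- B's digit of a character (proof abbreviation for pvDigMap.getD)
def pvDig (c : Char) : Int := pvDigMap.getD c (-1)

-- s.replace('T','U') with single-char arguments is a character map (unfolding PySem.Chars.replace.go)
theorem pv_replace_go (a b : Char) : ∀ (fuel : ℕ) (l acc : List Char), l.length ≤ fuel →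
    PySem.Chars.replace.go [a] [b] fuel l acc
      = acc.reverse ++ l.map (fun c => if a == c then b else c) := by
  intro fuel
  induction fuel with
  | zero =>
    intro l acc h
    have : l = [] := List.eq_nil_of_length_eq_zero (Nat.le_zero.mp h)
    subst this
    rw [PySem.Chars.replace.go]
    simp
  | succ n ih =>
    intro l acc h
    cases l with
    | nil => rw [PySem.Chars.replace.go]; simp; omega
    | cons c t =>
      rw [PySem.Chars.replace.go]
      simp only [List.isPrefixOf, Bool.and_true, List.length_cons] at *
      by_cases hac : (a == c) = true
      · simp only [hac, if_pos, List.length_nil, Nat.zero_add, List.drop_succ_cons,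
          List.drop_zero, List.reverse_singleton, List.singleton_append]
        rw [ih t (b :: acc) (by omega)]
        have hac' : a = c := beq_iff_eq.mp hac
        subst hac'
        simp
      · simp only [Bool.not_eq_true] at hac
        simp only [hac, Bool.false_eq_true, List.map_cons]
        rw [ih t (c :: acc) (by omega)]
        simp

theorem pv_replace_single (a b : Char) (s : List Char) :
    PySem.Chars.replace s [a] [b] = s.map (fun c => if a == c then b else c) := by
  rw [PySem.Chars.replace]
  simp only [List.isEmpty_cons, Bool.false_eq_true]
  rw [pv_replace_go a b s.length s [] (le_refl _)]
  simp

-- every key of codon_map has length 3, so strings of length at most 2 are never in it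
theorem pv_contains_short (r : List Char) (h : r.length ≤ 2) : pvCodonMap.contains r = false := by
  match r, h with
  | [], _ => decide
  | [x], _ => simp [pvCodonMap, PySem.Dict.contains_mk]
  | [x,y], _ => simp [pvCodonMap, PySem.Dict.contains_mk]

-- the short fragments contribute nothing to A's translation
theorem pv_junk (acc : List Char) (l : List Char) (h : l.length ≤ 2) : pvStepA acc l = acc := by
  show (if pvCodonMap.contains (PySem.Chars.replace l ['T'] ['U']) then
    acc ++ [pvCodonMap.getD (PySem.Chars.replace l ['T'] ['U']) 'X'] else acc) = acc
  rw [pv_contains_short _ (by rw [pv_replace_single]; simpa using h)]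
  simp

theorem pv_slice3 {α : Type} (xs : List α) (i : Int) (h : 0 ≤ i) :
    PySem.List.slice xs (some i) (some (i+3)) = (xs.drop i.toNat).take 3 := by
  rw [PySem.List.slice_toNat xs h (by omega)]
  congr 1
  omega

-- the codon list of the frame at offset d over s[d:] is the step-3 slice walk over s from d
theorem pv_codons_shift (cs : List Char) (d : ℕ) :
    (PySem.List.pyRange 0 (PySem.List.len (List.drop d cs)) 3).map
        (fun i => PySem.List.slice (List.drop d cs) (some i) (some (i+3)))
      = (PySem.List.pyRange (d:Int) (PySem.List.len cs) 3).map
        (fun i => PySem.List.slice cs (some i) (some (i+3))) := by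
  rw [PySem.List.pyRange_of_pos _ _ (by norm_num : (0:Int) < 3),
      PySem.List.pyRange_of_pos _ _ (by norm_num : (0:Int) < 3)]
  simp only [PySem.List.len_eq, List.length_drop, List.map_map]
  have hcnt : (if (0:Int) < ((cs.length - d : ℕ) : Int) then ((((cs.length - d : ℕ) : Int) - 0 + 3 - 1) / 3).toNat else 0)
      = (if (d:Int) < (cs.length : Int) then (((cs.length : Int) - d + 3 - 1) / 3).toNat else 0) := by
    by_cases hd : d < cs.length
    · rw [if_pos (by omega), if_pos (by omega)]
      congr 2
      omega
    · rw [if_neg (by omega), if_neg (by omega)]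
  rw [hcnt]
  apply List.map_congr_left
  intro k _
  simp only [Function.comp_apply]
  rw [pv_slice3 _ _ (by positivity), pv_slice3 _ _ (by positivity)]
  have h1 : ((0:Int) + 3 * (k:Int)).toNat = 3 * k := by omega
  have h2 : (((d:Int)) + 3 * (k:Int)).toNat = d + 3 * k := by omega
  rw [h1, h2, List.drop_drop]

theorem pv_insert0 {α : Type} (l : List α) (x : α) : PySem.List.insert l 0 x = x :: l := by
  simp [PySem.List.insert, PySem.List.sliceIndices]

-- every key of codon_map is made of RNA letters only
set_option maxRecDepth 4096 in
theorem pv_keys_rna : ∀ k ∈ pvCodonMap.keys, ∀ c ∈ k, c ∈ (['A','C','G','U'] : List Char) := by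
  have h : pvCodonMap.keys.all
      (fun k => k.all (fun c => decide (c ∈ (['A','C','G','U'] : List Char)))) = true := by rfl
  intro k hk c hc
  exact of_decide_eq_true (List.all_eq_true.mp (List.all_eq_true.mp h k hk) c hc)

-- characters outside A,C,G,T,U have digit -1 and stay outside A,C,G,U after T→U
theorem pv_dig_bad (c : Char) (h : c ∉ (['A','C','G','T','U'] : List Char)) : pvDig c = -1 := by
  simp only [List.mem_cons, List.not_mem_nil, or_false, not_or] at h
  obtain ⟨h1, h2, h3, h4, h5⟩ := h
  simp [pvDig, pvDigMap, PySem.Dict.getD, PySem.Dict.get?,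
    Ne.symm h1, Ne.symm h2, Ne.symm h3, Ne.symm h4, Ne.symm h5]

-- the T→U image of a letter outside A,C,G,T,U is outside A,C,G,U
theorem pv_tu_bad (c : Char) (h : c ∉ (['A','C','G','T','U'] : List Char)) :
    (if 'T' == c then 'U' else c) ∉ (['A','C','G','U'] : List Char) := by
  simp only [List.mem_cons, List.not_mem_nil, or_false, not_or] at h ⊢
  obtain ⟨h1, h2, h3, h4, h5⟩ := h
  rw [if_neg (by simpa using fun he => h4 he.symm)]
  exact ⟨h1, h2, h3, h5⟩

-- a triple with a component outside A,C,G,U is not a codon_map key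
theorem pv_contains_bad (p q t : Char)
    (h : p ∉ (['A','C','G','U'] : List Char) ∨ q ∉ (['A','C','G','U'] : List Char) ∨
         t ∉ (['A','C','G','U'] : List Char)) :
    pvCodonMap.contains [p, q, t] = false := by
  rw [PySem.Dict.contains_eq_decide_mem_keys]
  simp only [decide_eq_false_iff_not]
  intro hmem
  have h1 := pv_keys_rna _ hmem
  rcases h with h | h | h
  · exact h (h1 p (by simp))
  · exact h (h1 q (by simp))
  · exact h (h1 t (by simp))

-- A's step on a 3-char codon equals B's digit-arithmetic step (as emitted fragments)
set_option maxHeartbeats 2000000 in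
theorem pv_key (x y z : Char) :
    (if pvCodonMap.contains (PySem.Chars.replace [x,y,z] ['T'] ['U']) then
      ([pvCodonMap.getD (PySem.Chars.replace [x,y,z] ['T'] ['U']) 'X'] : List Char) else [])
    = (if 0 ≤ pvDig x ∧ 0 ≤ pvDig y ∧ 0 ≤ pvDig z then
        [PySem.List.pyGetD pvAA64 (16*pvDig x + 4*pvDig y + pvDig z) 'X'] else []) := by
  rw [pv_replace_single]
  simp only [List.map_cons, List.map_nil]
  by_cases hx : x ∈ (['A','C','G','T','U'] : List Char)
  · by_cases hy : y ∈ (['A','C','G','T','U'] : List Char)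
    · by_cases hz : z ∈ (['A','C','G','T','U'] : List Char)
      · fin_cases hx <;> fin_cases hy <;> fin_cases hz <;> decide
      · rw [pv_contains_bad _ _ _ (Or.inr (Or.inr (pv_tu_bad z hz)))]
        rw [if_neg (by simp), if_neg (by rw [pv_dig_bad z hz]; rintro ⟨-, -, h⟩; norm_num at h)]
    · rw [pv_contains_bad _ _ _ (Or.inr (Or.inl (pv_tu_bad y hy)))]
      rw [if_neg (by simp), if_neg (by rw [pv_dig_bad y hy]; rintro ⟨-, h, -⟩; norm_num at h)]
  · rw [pv_contains_bad _ _ _ (Or.inl (pv_tu_bad x hx))]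
    rw [if_neg (by simp), if_neg (by rw [pv_dig_bad x hx]; rintro ⟨h, -, -⟩; norm_num at h)]

-- the per-character scan of B: digs collects pvDig, rcd collects 3 - pvDig over the ACGT chars
theorem pv_scan (cs : List Char) (a b : List Int) :
    cs.foldl (fun (st : List Int × List Int) ch =>
      let d := pvDigMap.getD ch (-1)
      (st.1 ++ [d], if 0 ≤ d ∧ ch ≠ 'U' then st.2 ++ [3 - d] else st.2)) (a, b)
    = (a ++ cs.map pvDig,
       b ++ (cs.filter (fun c => decide (0 ≤ pvDig c ∧ c ≠ 'U'))).map (fun c => 3 - pvDig c)) := by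
  induction cs generalizing a b with
  | nil => simp
  | cons c t ih =>
    simp only [List.foldl_cons]
    rw [ih]
    simp only [List.map_cons, List.filter_cons]
    by_cases h : 0 ≤ pvDigMap.getD c (-1) ∧ c ≠ 'U'
    · rw [if_pos h, if_pos (show (decide (0 ≤ pvDig c ∧ c ≠ 'U')) = true from by simpa [pvDig] using h)]
      simp [pvDig]
    · rw [if_neg h, if_neg (show ¬ ((decide (0 ≤ pvDig c ∧ c ≠ 'U')) = true) from by simpa [pvDig] using h)]
      simp [pvDig]

-- the digits of A's reverse complement are B's rcd list
-- A's `c in 'ACGT'` guard is B's `0 ≤ dig and c != 'U'` guard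
theorem pv_filter_point (c : Char) :
    PySem.Chars.isIn [c] ['A','C','G','T'] = decide (0 ≤ pvDig c ∧ c ≠ 'U') := by
  have hmem : PySem.Chars.isIn [c] ['A','C','G','T'] = true ↔ c ∈ (['A','C','G','T'] : List Char) := by
    rw [PySem.Chars.isIn_iff_infix]
    exact List.singleton_infix_iff c _
  by_cases h : c ∈ (['A','C','G','T'] : List Char)
  · rw [hmem.mpr h]
    simp only [List.mem_cons, List.not_mem_nil, or_false] at h
    rcases h with rfl | rfl | rfl | rfl <;> decide
  · rw [Bool.eq_iff_iff, hmem]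
    simp only [decide_eq_true_iff]
    constructor
    · intro hc; exact absurd hc h
    · rintro ⟨h0, hU⟩
      exfalso
      by_cases hUc : c = 'U'
      · exact hU hUc
      · rw [pv_dig_bad c (by
          simp only [List.mem_cons, List.not_mem_nil, or_false, not_or] at h ⊢
          exact ⟨h.1, h.2.1, h.2.2.1, h.2.2.2, hUc⟩)] at h0
        norm_num at h0

-- for ACGT letters, the digit of the complement is 3 - the digit
theorem pv_compl_dig (c : Char) (h : c ∈ (['A','C','G','T'] : List Char)) :
    pvDig (pvComplA.getD c 'A') = 3 - pvDig c := by
  simp only [List.mem_cons, List.not_mem_nil, or_false] at h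
  rcases h with rfl | rfl | rfl | rfl <;> decide

theorem pv_rc_digs (cs : List Char) :
    (pvRevCompA cs).map pvDig
      = ((cs.filter (fun c => decide (0 ≤ pvDig c ∧ c ≠ 'U'))).map (fun c => 3 - pvDig c)).reverse := by
  unfold pvRevCompA
  rw [PySem.List.foldl_append_if (fun c => PySem.Chars.isIn [c] ['A','C','G','T'])
      (fun c => pvComplA.getD c 'A') cs []]
  rw [List.nil_append, List.map_reverse, List.map_map]
  congr 1
  rw [List.filter_congr (fun c _ => pv_filter_point c)]
  apply List.map_congr_left
  intro c hc
  have hP := List.of_mem_filter hc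
  simp only [decide_eq_true_iff] at hP
  have hmem : c ∈ (['A','C','G','T'] : List Char) := by
    by_contra hnot
    rw [pv_dig_bad c (by
      simp only [List.mem_cons, List.not_mem_nil, or_false, not_or] at hnot ⊢
      exact ⟨hnot.1, hnot.2.1, hnot.2.2.1, hnot.2.2.2, hP.2⟩)] at hP
    norm_num at hP
  exact pv_compl_dig c hmem

-- A's fold over the frame-d codons equals B's _translate over the digit list
-- the emitted fragment of A's step (pvStepA acc codon = acc ++ pvGA codon)
def pvGA (codon : List Char) : List Char :=
  if pvCodonMap.contains (PySem.Chars.replace codon ['T'] ['U'])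
  then [pvCodonMap.getD (PySem.Chars.replace codon ['T'] ['U']) 'X'] else []

theorem pvStepA_eq (acc codon : List Char) : pvStepA acc codon = acc ++ pvGA codon := by
  unfold pvStepA pvGA
  by_cases h : pvCodonMap.contains (PySem.Chars.replace codon ['T'] ['U']) = true
  · simp [h]
  · simp [h]

-- the emitted fragment of B's loop body
def pvGB (digs : List Int) (i : Int) : List Char :=
  if 0 ≤ PySem.List.pyGetD digs i (-1) ∧ 0 ≤ PySem.List.pyGetD digs (i+1) (-1) ∧
     0 ≤ PySem.List.pyGetD digs (i+2) (-1)
  then [PySem.List.pyGetD pvAA64 (16*PySem.List.pyGetD digs i (-1) +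
          4*PySem.List.pyGetD digs (i+1) (-1) + PySem.List.pyGetD digs (i+2) (-1)) 'X']
  else []

theorem pvTrB_eq (digs : List Int) (offset : Int) :
    pvTrB digs offset
      = String.ofList ((PySem.List.pyRange offset (PySem.List.len digs - 2) 3).flatMap (pvGB digs)) := by
  unfold pvTrB
  congr 1
  rw [show (fun (out : List Char) (i : Int) =>
      let a := PySem.List.pyGetD digs i (-1)
      let b := PySem.List.pyGetD digs (i+1) (-1)
      let c := PySem.List.pyGetD digs (i+2) (-1)
      if 0 ≤ a ∧ 0 ≤ b ∧ 0 ≤ c then out ++ [PySem.List.pyGetD pvAA64 (16*a+4*b+c) 'X'] else out)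
    = (fun out i => out ++ pvGB digs i) from by
      funext out i
      show (if _ then out ++ _ else out) = out ++ pvGB digs i
      unfold pvGB
      split_ifs <;> simp]
  rw [PySem.List.foldl_append_eq_flatMap]
  simp

-- range extension: extra indices whose piece is empty can be dropped from a flatMap
theorem pv_flatMap_range_ext {α : Type} (m n : ℕ) (f g : ℕ → List α) (hmn : m ≤ n)
    (h1 : ∀ k, k < m → f k = g k) (h2 : ∀ k, m ≤ k → k < n → f k = []) :
    (List.range n).flatMap f = (List.range m).flatMap g := by
  obtain ⟨p, rfl⟩ := Nat.exists_eq_add_of_le hmn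
  rw [List.range_add, List.flatMap_append]
  have hzero : ((List.range p).map (m + ·)).flatMap f = [] := by
    rw [List.flatMap_map]
    apply List.flatMap_eq_nil_iff.mpr
    intro k hk
    have := h2 (m + k) (by omega) (by rw [List.mem_range] at hk; omega)
    simpa using this
  rw [hzero, List.append_nil]
  have hcongr : ∀ l : List ℕ, (∀ k ∈ l, f k = g k) → l.flatMap f = l.flatMap g := by
    intro l h
    induction l with
    | nil => rfl
    | cons a t ih =>
      simp only [List.flatMap_cons]
      rw [h a (by simp), ih (fun k hk => h k (by simp [hk]))]
  exact hcongr _ (fun k hk => h1 k (List.mem_range.mp hk))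

-- a length-3 window as an explicit triple
theorem pv_take3 (cs : List Char) (i : ℕ) (h : i + 3 ≤ cs.length) :
    (cs.drop i).take 3 = [cs[i], cs[i+1], cs[i+2]] := by
  have h1 : cs.drop i = cs[i] :: cs.drop (i+1) := List.drop_eq_getElem_cons (by omega)
  have h2 : cs.drop (i+1) = cs[i+1] :: cs.drop (i+2) := List.drop_eq_getElem_cons (by omega)
  have h3 : cs.drop (i+2) = cs[i+2] :: cs.drop (i+3) := List.drop_eq_getElem_cons (by omega)
  rw [h1, h2, h3]
  rfl

theorem pv_frame (cs : List Char) (d : ℕ) :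
    String.ofList (((PySem.List.pyRange 0 (PySem.List.len (List.drop d cs)) 3).map
        (fun i => PySem.List.slice (List.drop d cs) (some i) (some (i+3)))).foldl pvStepA [])
      = pvTrB (cs.map pvDig) (d:Int) := by
  rw [pv_codons_shift, pvTrB_eq]
  rw [show pvStepA = (fun acc codon => acc ++ pvGA codon) from
    funext fun a => funext fun c => pvStepA_eq a c]
  rw [PySem.List.foldl_append_eq_flatMap, List.nil_append]
  congr 1
  have hlen : PySem.List.len (cs.map pvDig) = (cs.length : Int) := by simp
  rw [hlen, List.flatMap_map]
  simp only [PySem.List.len_eq]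
  rw [PySem.List.pyRange_of_pos _ _ (by norm_num : (0:Int) < 3),
      PySem.List.pyRange_of_pos _ _ (by norm_num : (0:Int) < 3),
      List.flatMap_map, List.flatMap_map]
  apply pv_flatMap_range_ext
  · -- count of B ≤ count of A
    split_ifs <;> omega
  · -- matching full windows
    intro k hk
    have hibound : d + 3 * k + 3 ≤ cs.length := by
      split_ifs at hk <;> omega
    rw [pv_slice3 _ _ (by positivity)]
    have htn : ((d:Int) + 3 * (k:Int)).toNat = d + 3*k := by omega
    rw [htn, pv_take3 cs _ (by omega)]
    show pvGA _ = pvGB _ _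
    unfold pvGA pvGB
    rw [pv_key]
    have e0 : (d:Int) + 3 * (k:Int) = ((d + 3*k : ℕ) : Int) := by push_cast; ring
    have e1 : (d:Int) + 3 * (k:Int) + 1 = ((d + 3*k + 1 : ℕ) : Int) := by push_cast; ring
    have e2 : (d:Int) + 3 * (k:Int) + 2 = ((d + 3*k + 2 : ℕ) : Int) := by push_cast; ring
    rw [e1, e2, e0]
    have hg : ∀ (j : ℕ) (hj : j < cs.length),
        PySem.List.pyGetD (cs.map pvDig) ((j : ℕ) : Int) (-1) = pvDig (cs[j]'hj) := by
      intro j hj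
      rw [PySem.List.pyGetD_natCast,
        List.getD_eq_getElem _ _ (by simpa using hj)]
      simp
    rw [hg _ (by omega), hg _ (by omega), hg _ (by omega)]
    rfl
  · -- trailing short windows vanish
    intro k hk1 hk2
    have hik : cs.length ≤ d + 3 * k + 2 := by
      split_ifs at hk1 <;> omega
    rw [pv_slice3 _ _ (by positivity)]
    show pvGA _ = []
    unfold pvGA
    rw [pv_contains_short _ (by
      rw [pv_replace_single]
      simp only [List.length_map, List.length_take, List.length_drop]
      omega)]
    simp

-- the three port-shaped frame equalities
theorem pv_frame0 (cs : List Char) :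
    String.ofList (((PySem.List.pyRange 0 (PySem.List.len cs) 3).map
        (fun i => PySem.List.slice cs (some i) (some (i+3)))).foldl pvStepA [])
      = pvTrB (cs.map pvDig) 0 := by
  have := pv_frame cs 0
  simpa using this

theorem pv_frame1 (cs : List Char) :
    String.ofList ((PySem.List.insert
      ((PySem.List.pyRange 0 (PySem.List.len (PySem.List.slice cs (some 1) none)) 3).map
        (fun i => PySem.List.slice (PySem.List.slice cs (some 1) none) (some i) (some (i+3)))) 0
      (PySem.List.slice cs none (some 1))).foldl pvStepA [])
      = pvTrB (cs.map pvDig) 1 := by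
  rw [pv_insert0, PySem.List.slice_from cs (by norm_num : (0:Int) ≤ 1),
      PySem.List.slice_to cs (by norm_num : (0:Int) ≤ 1), List.foldl_cons,
      pv_junk _ _ (by simp [List.length_take])]
  have := pv_frame cs 1
  simpa using this

theorem pv_frame2 (cs : List Char) :
    String.ofList ((PySem.List.insert
      ((PySem.List.pyRange 0 (PySem.List.len (PySem.List.slice cs (some 2) none)) 3).map
        (fun i => PySem.List.slice (PySem.List.slice cs (some 2) none) (some i) (some (i+3)))) 0
      (PySem.List.slice cs none (some 2))).foldl pvStepA [])
      = pvTrB (cs.map pvDig) 2 := by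
  rw [pv_insert0, PySem.List.slice_from cs (by norm_num : (0:Int) ≤ 2),
      PySem.List.slice_to cs (by norm_num : (0:Int) ≤ 2), List.foldl_cons,
      pv_junk _ _ (by simp [List.length_take])]
  have := pv_frame cs 2
  simpa using this

-- ===== VERDICT (by name: the statement is the Claim_ definition above) =====
theorem six_frame_translation_spec : Claim_equal_six_frame_translation := by
  intro s _
  unfold Spec_six_frame_translation six_frame_translation six_frame_translation_alt pvTFT
  rw [PySem.List.foldl_append_singleton_eq_map, pv_scan]
  simp only [List.nil_append, List.cons_append, List.map_cons, List.map_nil, List.cons.injEq, and_true]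
  refine ⟨pv_frame0 _, pv_frame1 _, pv_frame2 _, ?_, ?_, ?_⟩
  · rw [← pv_rc_digs]; exact pv_frame0 _
  · rw [← pv_rc_digs]; exact pv_frame1 _
  · rw [← pv_rc_digs]; exact pv_frame2 _
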